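-- pv_equiv track=rewrite | github.com/kubanmar/madas | similarity_crawler.py | orphans
-- ===== SOURCE A (Python) =====
-- def orphans(neighbors_dict, group_member_list):
--     orphans = {}
--     full_list = []
--     for item in group_member_list:
--         for member in item:
--             full_list.append(member)
--     for mid in neighbors_dict.keys():
--         if not mid in full_list:
--             orphans[mid] = neighbors_dict[mid]
--     return orphans
-- ===== SOURCE B (Python) =====
-- def orphans(neighbors_dict, group_member_list):
--     # Maintain the result as "everything minus the group members": start from a
--     # copy of the dict and delete each group member, instead of building the
--     # full member list and scanning it for every key.
--     result = dict(neighbors_dict)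
--     for item in group_member_list:
--         for member in item:
--             result.pop(member, None)
--     return result
-- ===== Notes on version B (the rewrite author's own statement) =====
-- stated objective: faster
-- what changed: B starts from a copy of the dict and deletes each group member with pop(member, None), instead of concatenating all groups into a full list and testing every dict key for membership in it with a linear scan.
import Mathlib
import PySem

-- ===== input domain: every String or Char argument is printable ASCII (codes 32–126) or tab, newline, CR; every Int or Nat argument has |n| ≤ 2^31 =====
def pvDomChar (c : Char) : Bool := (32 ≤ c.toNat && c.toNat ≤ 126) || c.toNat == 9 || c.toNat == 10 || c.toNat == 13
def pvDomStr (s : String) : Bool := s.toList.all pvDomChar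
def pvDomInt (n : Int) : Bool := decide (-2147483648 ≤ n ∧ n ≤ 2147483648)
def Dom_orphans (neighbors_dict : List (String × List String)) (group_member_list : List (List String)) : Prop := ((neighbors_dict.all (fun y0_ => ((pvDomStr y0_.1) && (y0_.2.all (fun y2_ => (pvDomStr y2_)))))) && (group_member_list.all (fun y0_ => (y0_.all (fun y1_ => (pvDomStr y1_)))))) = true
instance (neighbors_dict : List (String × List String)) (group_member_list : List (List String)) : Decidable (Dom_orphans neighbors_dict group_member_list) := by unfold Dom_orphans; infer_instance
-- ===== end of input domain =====

-- B replaces A's full-list build + per-key membership scan by deleting each group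
-- member from a copy of the dict (objective: faster, O(k+m) vs O(k*m)).

-- ===== PORT A =====
-- A: build full_list by appending every member of every group, then keep each
-- dict key not contained in full_list.
def orphans (neighbors_dict : List (String × List String)) (group_member_list : List (List String)) : List (String × List String) :=
  let d := PySem.Dict.mk neighbors_dict
  let full_list := group_member_list.foldl (fun fl item => item.foldl (fun fl member => fl ++ [member]) fl) []
  let orph := d.keys.foldl
    (fun o mid => if full_list.contains mid then o else o.insert mid (d.getD mid [])) PySem.Dict.empty
  orph.items

-- ===== PORT B =====
-- B: copy the dict, then pop every group member from the copy.
def orphans_alt (neighbors_dict : List (String × List String)) (group_member_list : List (List String)) : List (String × List String) :=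
  let result := group_member_list.foldl
    (fun r item => item.foldl (fun r member => r.erase member) r) (PySem.Dict.mk neighbors_dict)
  result.items

-- ===== PRECONDITION & SPEC =====
-- Pre_ excludes association lists with duplicate keys: a Python dict cannot
-- contain a duplicate key, so such lists represent no actual input of A.
def Pre_orphans (neighbors_dict : List (String × List String)) (group_member_list : List (List String)) : Prop :=
  (neighbors_dict.map Prod.fst).Nodup
instance (neighbors_dict : List (String × List String)) (group_member_list : List (List String)) : Decidable (Pre_orphans neighbors_dict group_member_list) := by unfold Pre_orphans; infer_instance
def pvWitness_orphans : (List (String × List String)) × List (List String) :=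
  ([("a", ["b"]), ("c", [])], [["c", "d"], []])
def Spec_orphans (neighbors_dict : List (String × List String)) (group_member_list : List (List String)) (out : List (String × List String)) : Prop := out = orphans_alt neighbors_dict group_member_list
instance (neighbors_dict : List (String × List String)) (group_member_list : List (List String)) (out : List (String × List String)) : Decidable (Spec_orphans neighbors_dict group_member_list out) := by unfold Spec_orphans; infer_instance

-- ===== CLAIM (what is proved, stated in full; the proofs are below) =====
def Claim_equal_orphans : Prop := ∀ (neighbors_dict : List (String × List String)) (group_member_list : List (List String)), Dom_orphans neighbors_dict group_member_list → Pre_orphans neighbors_dict group_member_list → Spec_orphans neighbors_dict group_member_list (orphans neighbors_dict group_member_list)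

-- ===== LEMMAS AND PROOFS =====

-- A's append loops build exactly the flattening of group_member_list.
theorem pv_foldl_append_one {α : Type} (l : List α) (a : List α) :
    l.foldl (fun fl x => fl ++ [x]) a = a ++ l := by
  induction l generalizing a with
  | nil => simp
  | cons x l ih => simp [List.foldl, ih]

theorem pv_full_list_eq (gml : List (List String)) :
    gml.foldl (fun fl item => item.foldl (fun fl member => fl ++ [member]) fl) [] = gml.flatten := by
  have h : ∀ (a : List String),
      gml.foldl (fun fl item => item.foldl (fun fl member => fl ++ [member]) fl) a = a ++ gml.flatten := by
    induction gml with
    | nil => simp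
    | cons i t ih =>
        intro a
        rw [List.foldl_cons, pv_foldl_append_one, ih, List.flatten_cons, List.append_assoc]
  simpa using h []

-- A's filtering loop over fresh distinct keys, characterised as a filter.
theorem pv_A_loop (d : PySem.Dict String (List String)) (full : List String)
    (ks : List String) (o : PySem.Dict String (List String))
    (hks : ks.Nodup) (hdisj : ∀ k ∈ ks, o.contains k = false) :
    (ks.foldl (fun o mid => if full.contains mid then o else o.insert mid (d.getD mid [])) o).items
      = o.items ++ (ks.filter (fun k => !full.contains k)).map (fun k => (k, d.getD k [])) := by
  induction ks generalizing o with
  | nil => simp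
  | cons k t ih =>
    have hk : o.contains k = false := hdisj k (by simp)
    have ht : t.Nodup := hks.of_cons
    by_cases hf : full.contains k = true
    · rw [List.foldl_cons, if_pos hf, ih o ht (fun k' hk' => hdisj k' (by simp [hk'])),
        List.filter_cons]
      have hf' : k ∈ full := by simpa using hf
      simp [hf']
    · have hne : ∀ k' ∈ t, k' ≠ k := by
        intro k' hk' he; exact (List.nodup_cons.mp hks).1 (he ▸ hk')
      have hdisj' : ∀ k' ∈ t, (o.insert k (d.getD k [])).contains k' = false := by
        intro k' hk'
        rw [PySem.Dict.contains_insert]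
        simp [hne k' hk', hdisj k' (by simp [hk'])]
      rw [List.foldl_cons, if_neg hf, ih (o.insert k (d.getD k [])) ht hdisj',
        PySem.Dict.items_insert_of_not_contains o _ hk, List.filter_cons,
        if_pos (by simpa using hf : (!full.contains k) = true)]
      simp [List.append_assoc]

-- B's erase loop, characterised as the same filter.
theorem pv_erase_loop (l : List String) (d : PySem.Dict String (List String)) :
    (l.foldl (fun r member => r.erase member) d).items
      = d.items.filter (fun p => !l.contains p.1) := by
  induction l generalizing d with
  | nil => simp
  | cons x t ih =>
    have : (d.erase x).items = d.items.filter (fun p => !(p.1 == x)) := rfl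
    simp only [List.foldl, ih, this, List.filter_filter]
    apply List.filter_congr
    intro p _
    by_cases h : p.1 = x <;> simp [h]

theorem orphans_spec_aux (nd : List (String × List String)) (gml : List (List String))
    (hnd : (nd.map Prod.fst).Nodup) :
    orphans nd gml = orphans_alt nd gml := by
  unfold orphans orphans_alt
  have hkeys : (PySem.Dict.mk nd).keys = nd.map Prod.fst := rfl
  have hitems : (PySem.Dict.mk nd).items = nd := rfl
  have hknd : (PySem.Dict.mk nd).keys.Nodup := by rw [hkeys]; exact hnd
  rw [pv_full_list_eq, ← List.foldl_flatten, pv_erase_loop,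
    pv_A_loop (PySem.Dict.mk nd) gml.flatten (PySem.Dict.mk nd).keys PySem.Dict.empty hknd
      (fun k _ => PySem.Dict.contains_empty k)]
  rw [PySem.Dict.items_eq_map_keys _ hknd ([] : List String), List.filter_map]
  simp [Function.comp_def, PySem.Dict.empty]

-- ===== VERDICT (by name: the statement is the Claim_ definition above) =====
theorem orphans_spec : Claim_equal_orphans := by
  intro nd gml _ hpre
  exact orphans_spec_aux nd gml hpre
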